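-- pv_equiv track=rewrite | github.com/Ausium/udi_Scripts | elk_week/elk_weekly.py | data_convert
-- ===== SOURCE A (Python) =====
-- def data_convert(data: dict):
--     """将数据转换成适合表格的形式"""
--     n = 1
--     _new_value = {}
--     for item in data.values():
--         for key, value in item.items():
--             if key in _new_value:
--                 _new_value[key].append(value)
--                 if len(_new_value[key]) != n:
--                     for i in range(len(_new_value[key]) - 1, n - 1):
--                         _new_value[key].insert(i, 0)
--             else:
--                 _new_value[key] = [value]
--                 if n != 1:
--                     for i in range(0, n-1):
--                         _new_value[key].insert(i, 0)
--         n += 1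
--     return _new_value
-- ===== SOURCE B (Python) =====
-- def data_convert(data: dict):
--     """将数据转换成适合表格的形式"""
--     index = {}
--     for r, item in enumerate(data.values()):
--         for key, value in item.items():
--             index.setdefault(key, {})[r] = value
--     result = {}
--     for key, rows in index.items():
--         lst = [0] * (max(rows) + 1)
--         for r, value in rows.items():
--             lst[r] = value
--         result[key] = lst
--     return result
-- ===== Notes on version B (the rewrite author's own statement) =====
-- stated objective: alternative
-- what changed: Replaces A's incremental sweep that appends each value and zero-pads columns in place with list.insert by a two-phase pivot: first build an index from each key to its row-to-value map, then materialize each column once as a pre-allocated zero list of length last-row+1 filled by direct assignment.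
import Mathlib
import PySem

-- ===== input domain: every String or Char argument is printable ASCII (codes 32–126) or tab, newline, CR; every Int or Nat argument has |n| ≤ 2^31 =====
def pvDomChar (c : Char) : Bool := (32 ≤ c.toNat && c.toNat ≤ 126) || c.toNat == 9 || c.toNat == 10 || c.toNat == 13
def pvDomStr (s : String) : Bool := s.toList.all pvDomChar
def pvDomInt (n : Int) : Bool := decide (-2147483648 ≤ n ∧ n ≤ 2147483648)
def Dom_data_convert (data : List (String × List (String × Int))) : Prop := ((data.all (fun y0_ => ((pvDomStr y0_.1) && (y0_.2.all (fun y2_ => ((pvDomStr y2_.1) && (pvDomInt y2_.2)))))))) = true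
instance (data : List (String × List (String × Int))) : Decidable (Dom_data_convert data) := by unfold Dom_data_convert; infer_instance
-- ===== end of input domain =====

-- B replaces A's incremental append/insert zero-padding during the row sweep by a two-phase
-- pivot (index key → {row: value}, then materialize each zero-filled column by direct
-- assignment); alternative decomposition, same exact result.


-- ===== PORT A =====
-- the body of A's inner 'for i in range(a, b): lst.insert(i, 0)' padding loops
def padZeros (lst : List Int) (a b : Int) : List Int :=
  (PySem.List.pyRange a b).foldl (fun l i => PySem.List.insert l i (0 : Int)) lst

-- the body of A's inner 'for key, value in item.items()' loop (n is the outer counter)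
def stepA (n : Int) (nv : PySem.Dict String (List Int)) (kv : String × Int) :
    PySem.Dict String (List Int) :=
  if nv.contains kv.1 then
    let lst := nv.getD kv.1 [] ++ [kv.2]
    let lst := if PySem.List.len lst ≠ n then padZeros lst (PySem.List.len lst - 1) (n - 1) else lst
    nv.insert kv.1 lst
  else
    let lst := [kv.2]
    let lst := if n ≠ 1 then padZeros lst 0 (n - 1) else lst
    nv.insert kv.1 lst

def data_convert (data : List (String × List (String × Int))) : List (String × List Int) :=
  ((PySem.Dict.ofList data).values.foldl
    (fun (st : Int × PySem.Dict String (List Int)) item =>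
      (st.1 + 1, (PySem.Dict.ofList item).items.foldl (stepA st.1) st.2))
    (1, PySem.Dict.empty)).2.items

-- ===== PORT B =====
-- the body of B's 'index.setdefault(key, {})[r] = value'
def stepB (r : Int) (index : PySem.Dict String (PySem.Dict Int Int)) (kv : String × Int) :
    PySem.Dict String (PySem.Dict Int Int) :=
  index.insert kv.1 ((index.getD kv.1 PySem.Dict.empty).insert r kv.2)

-- B's per-key column materialization: lst = [0]*(max(rows)+1); for r, value in rows.items(): lst[r] = value
def buildCol (rows : PySem.Dict Int Int) : List Int :=
  rows.items.foldl (fun l rv => PySem.List.pySetD l rv.1 rv.2)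
    (List.replicate ((PySem.List.max? rows.keys (fun x => x)).getD 0 + 1).toNat (0 : Int))

def data_convert_alt (data : List (String × List (String × Int))) : List (String × List Int) :=
  let index := (PySem.List.enumerate (PySem.Dict.ofList data).values).foldl
    (fun (index : PySem.Dict String (PySem.Dict Int Int)) ri =>
      (PySem.Dict.ofList ri.2).items.foldl (stepB ri.1) index)
    PySem.Dict.empty
  (index.items.foldl
    (fun (result : PySem.Dict String (List Int)) krows => result.insert krows.1 (buildCol krows.2))
    PySem.Dict.empty).items

-- ===== PRECONDITION & SPEC =====
def Spec_data_convert (data : List (String × List (String × Int))) (out : List (String × List Int)) : Prop := out = data_convert_alt data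
instance (data : List (String × List (String × Int))) (out : List (String × List Int)) : Decidable (Spec_data_convert data out) := by unfold Spec_data_convert; infer_instance

-- ===== CLAIM (what is proved, stated in full; the proofs are below) =====
def Claim_equal_data_convert : Prop := ∀ (data : List (String × List (String × Int))), Dom_data_convert data → Spec_data_convert data (data_convert data)

-- ===== LEMMAS AND PROOFS =====

-- canonical column: value of the (first-match) lookup at each row index below m, 0 where absent
def col (m : Nat) (items : List (Int × Int)) : List Int :=
  (List.range m).map (fun i => (List.lookup ((i : Nat) : Int) items).getD 0)

lemma pySetD_eq_set (l : List Int) (k : Int) (v : Int) (h0 : 0 ≤ k) (hk : k < (l.length : Int)) :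
    PySem.List.pySetD l k v = l.set k.toNat v := by
  simp [PySem.List.pySetD, PySem.List.pySet?, PySem.List.pyIdx?, h0, hk]

lemma lookup_none (l : List (Int × Int)) (a : Int) (h : a ∉ l.map Prod.fst) :
    List.lookup a l = none := by
  induction l with
  | nil => rfl
  | cons p t ih =>
    obtain ⟨k0, v0⟩ := p
    simp only [List.map_cons, List.mem_cons, not_or] at h
    rw [List.lookup_cons]
    have hf : (a == k0) = false := by simpa using h.1
    simp [hf, ih h.2]

lemma setAll_get? (items : List (Int × Int)) (init : List Int) (i : Nat)
    (hnd : (items.map Prod.fst).Nodup)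
    (hb : ∀ p ∈ items, 0 ≤ p.1 ∧ p.1 < (init.length : Int)) (hi : i < init.length) :
    (items.foldl (fun l rv => PySem.List.pySetD l rv.1 rv.2) init)[i]? =
      some ((List.lookup ((i : Nat) : Int) items).getD (init.getD i 0)) := by
  induction items generalizing init with
  | nil => simp [List.getD_eq_getElem?_getD, List.getElem?_eq_getElem hi]
  | cons p t ih =>
    obtain ⟨k, v⟩ := p
    obtain ⟨hk0, hklt⟩ := hb (k, v) (List.mem_cons_self)
    simp only [List.foldl_cons]
    rw [pySetD_eq_set _ _ _ hk0 hklt]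
    simp only [List.map_cons, List.nodup_cons] at hnd
    have hlen : (init.set k.toNat v).length = init.length := by simp
    rw [ih (init.set k.toNat v) (hnd.2) (fun q hq => by
        simpa using hb q (List.mem_cons_of_mem _ hq)) (by omega)]
    by_cases hik : (i : Int) = k
    · subst hik
      rw [lookup_none t _ hnd.1, List.lookup_cons]
      simp only [BEq.rfl]
      simp [List.getD_eq_getElem?_getD, hi]
    · rw [List.lookup_cons]
      have : (((i:Nat):Int) == k) = false := by simp [hik]
      simp only [this]
      have hne : k.toNat ≠ i := by omega
      simp [List.getD_eq_getElem?_getD, hne]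

lemma max?_last (l : List Int) (x : Int) (h : ∀ y ∈ l, y < x) :
    PySem.List.max? (l ++ [x]) (fun z => z) = some x := by
  rcases hm : PySem.List.max? (l ++ [x]) (fun z => z) with _ | m
  · simp [PySem.List.max?_eq_none_iff] at hm
  · have hmem := PySem.List.max?_mem hm
    have hle : x ≤ m := by simpa using PySem.List.max?_isMax hm x (by simp)
    rcases List.mem_append.1 hmem with hl | hx
    · exfalso; have := h m hl; omega
    · simp at hx; simp [hx]

lemma padA (g : Nat) (lst0 : List Int) (v : Int) :
    (PySem.List.pyRange (lst0.length : Int) ((lst0.length : Int) + (g : Int))).foldl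
        (fun l i => PySem.List.insert l i (0 : Int)) (lst0 ++ [v]) =
      lst0 ++ List.replicate g 0 ++ [v] := by
  induction g generalizing lst0 with
  | zero => simp [PySem.List.pyRange]
  | succ g ih =>
    rw [PySem.List.pyRange_one_cons (by omega), List.foldl_cons]
    have hins : PySem.List.insert (lst0 ++ [v]) (lst0.length : Int) 0 = (lst0 ++ [0]) ++ [v] := by
      rw [PySem.List.insert_natCast _ _ _ (by simp)]
      simp
    rw [hins]
    rw [show (lst0.length : Int) + 1 = ((lst0.length + 1 : Nat) : Int) by push_cast; ring,
      show ((lst0.length : Int)) + ((g + 1 : Nat) : Int) = ((lst0.length + 1 : Nat) : Int) + (g : Nat) by push_cast; ring]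
    rw [show ((lst0.length + 1 : Nat) : Int) = ((lst0 ++ [0]).length : Int) by simp, ih (lst0 ++ [0])]
    simp [List.replicate_succ]


lemma setAll_length (items : List (Int × Int)) (init : List Int) :
    (items.foldl (fun l rv => PySem.List.pySetD l rv.1 rv.2) init).length = init.length := by
  induction items generalizing init with
  | nil => rfl
  | cons p t ih => simp [List.foldl_cons, ih, PySem.List.length_pySetD]

lemma buildCol_eq_col (rows : PySem.Dict Int Int) (M : Int)
    (hnd : rows.keys.Nodup) (hnn : ∀ k ∈ rows.keys, 0 ≤ k)
    (hmax : PySem.List.max? rows.keys (fun x => x) = some M) :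
    buildCol rows = col (M.toNat + 1) rows.items := by
  have hM0 : 0 ≤ M := hnn M (PySem.List.max?_mem hmax)
  have hkeys : rows.keys = rows.items.map Prod.fst := rfl
  have hnd' : (rows.items.map Prod.fst).Nodup := hkeys ▸ hnd
  have htn : ((PySem.List.max? rows.keys (fun x => x)).getD 0 + 1).toNat = M.toNat + 1 := by
    rw [hmax]; simp; omega
  have hbd : ∀ p ∈ rows.items, 0 ≤ p.1 ∧ p.1 < ((List.replicate (M.toNat + 1) (0:Int)).length : Int) := by
    intro p hp
    have hmem : p.1 ∈ rows.keys := hkeys ▸ List.mem_map_of_mem hp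
    have h1 := hnn p.1 hmem
    have h2 : p.1 ≤ M := PySem.List.max?_isMax hmax p.1 hmem
    simp; omega
  unfold buildCol
  rw [htn]
  apply List.ext_getElem?
  intro i
  by_cases hi : i < M.toNat + 1
  · rw [setAll_get? rows.items _ i hnd' hbd (by simpa using hi)]
    simp [col, hi]
  · have h1 : (rows.items.foldl (fun l rv => PySem.List.pySetD l rv.1 rv.2)
        (List.replicate (M.toNat + 1) (0:Int))).length = M.toNat + 1 := by
      rw [setAll_length]; simp
    have h2 : (col (M.toNat + 1) rows.items).length = M.toNat + 1 := by simp [col]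
    rw [List.getElem?_eq_none (by omega), List.getElem?_eq_none (by omega)]

lemma col_append (items : List (Int × Int)) (L r : Nat) (v : Int)
    (hb : ∀ p ∈ items, 0 ≤ p.1 ∧ p.1 < (L : Int)) (hLr : L ≤ r) :
    col (r + 1) (items ++ [(((r : Nat) : Int), v)]) =
      col L items ++ List.replicate (r - L) 0 ++ [v] := by
  have hsplit : r + 1 = L + ((r - L) + 1) := by omega
  unfold col
  rw [hsplit, List.range_add, List.map_append, List.append_assoc]
  congr 1
  · apply List.map_congr_left
    intro i hi
    have hiL : i < L := List.mem_range.1 hi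
    rw [List.lookup_append, lookup_none [(((r : Nat) : Int), v)] _ (by simp; omega)]
    simp
  · rw [List.map_map, List.range_succ, List.map_append]
    congr 1
    · have : ∀ j ∈ List.range (r - L), (List.lookup (((L + j : Nat) : Int))
          (items ++ [(((r : Nat) : Int), v)])).getD 0 = 0 := by
        intro j hj
        have hj' : j < r - L := List.mem_range.1 hj
        rw [List.lookup_append, lookup_none items _ (by
            intro hmem
            obtain ⟨p, hp, hpe⟩ := List.mem_map.1 hmem
            have := hb p hp; omega),
          lookup_none [(((r : Nat) : Int), v)] _ (by simp; omega)]
        simp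
      calc (List.range (r - L)).map (fun x => (List.lookup (((L + x : Nat) : Int))
              (items ++ [(((r : Nat) : Int), v)])).getD 0)
          = (List.range (r - L)).map (fun _ => (0 : Int)) := by
            apply List.map_congr_left
            intro j hj
            exact this j hj
        _ = List.replicate (r - L) 0 := by simp [List.map_const']
    · have hrL : L + (r - L) = r := by omega
      simp only [List.map_cons, List.map_nil, Function.comp_apply, hrL]
      rw [List.lookup_append, lookup_none items _ (by
          intro hmem
          obtain ⟨p, hp, hpe⟩ := List.mem_map.1 hmem
          have := hb p hp; omega)]
      simp

-- the loop invariant tying A's dict of columns to B's index of row-maps, mid-row r with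
-- pending inner pairs ps
def InnerInv (r : Nat) (ps : List (String × Int))
    (idx : PySem.Dict String (PySem.Dict Int Int)) (d : PySem.Dict String (List Int)) : Prop :=
  d.items = idx.items.map (fun p => (p.1, buildCol p.2)) ∧
  idx.keys.Nodup ∧
  (∀ p ∈ idx.items, p.2.items ≠ [] ∧ p.2.keys.Nodup ∧ ∀ k ∈ p.2.keys, 0 ≤ k ∧ k ≤ (r : Int)) ∧
  (∀ q ∈ ps, ∀ rows, idx.get? q.1 = some rows → ∀ k ∈ rows.keys, k < (r : Int))

-- between rows: every recorded row index is < r and no pending pairs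
def LoopInv (r : Nat) (idx : PySem.Dict String (PySem.Dict Int Int))
    (d : PySem.Dict String (List Int)) : Prop :=
  d.items = idx.items.map (fun p => (p.1, buildCol p.2)) ∧
  idx.keys.Nodup ∧
  (∀ p ∈ idx.items, p.2.items ≠ [] ∧ p.2.keys.Nodup ∧ ∀ k ∈ p.2.keys, 0 ≤ k ∧ k < (r : Int))

lemma step_preserve (r : Nat) (ps : List (String × Int)) (k : String) (v : Int)
    (idx : PySem.Dict String (PySem.Dict Int Int)) (d : PySem.Dict String (List Int))
    (hk : k ∉ ps.map Prod.fst)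
    (hInv : InnerInv r ((k, v) :: ps) idx d) :
    InnerInv r ps (stepB (r : Int) idx (k, v)) (stepA ((r : Int) + 1) d (k, v)) := by
  obtain ⟨hrel, hnd, hrows, hpend⟩ := hInv
  have hkeys_eq : d.keys = idx.keys := by
    show d.items.map (fun p => p.1) = idx.items.map (fun p => p.1)
    rw [hrel, List.map_map]
    rfl
  have hdnod : d.keys.Nodup := hkeys_eq ▸ hnd
  have hcont : d.contains k = idx.contains k := by
    rw [PySem.Dict.contains_eq_decide_mem_keys, PySem.Dict.contains_eq_decide_mem_keys, hkeys_eq]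
  by_cases hc : idx.contains k = true
  case pos =>
    -- the key already has a column: A appends and pads, B records row r
    cases hg : idx.get? k with
    | none => rw [PySem.Dict.get?_eq_none_iff_contains] at hg; rw [hg] at hc; cases hc
    | some rows =>
    have hmemit : (k, rows) ∈ idx.items := (PySem.Dict.get?_eq_some_iff_mem_items idx k rows hnd).1 hg
    obtain ⟨hne, hrnd, hbound⟩ := hrows _ hmemit
    have hlt : ∀ j ∈ rows.keys, j < (r : Int) := hpend (k, v) List.mem_cons_self rows hg
    have hkne : rows.keys ≠ [] := by
      have : rows.keys = rows.items.map (fun p => p.1) := rfl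
      rw [this]
      simpa using hne
    rcases hM : PySem.List.max? rows.keys (fun x => x) with _ | M
    · exact absurd ((PySem.List.max?_eq_none_iff _ _).1 hM) hkne
    have hMmem : M ∈ rows.keys := PySem.List.max?_mem hM
    have hM0 : 0 ≤ M := (hbound M hMmem).1
    have hMr : M < (r : Int) := hlt M hMmem
    have hcol : buildCol rows = col (M.toNat + 1) rows.items :=
      buildCol_eq_col rows M hrnd (fun j hj => (hbound j hj).1) hM
    have hlen : (buildCol rows).length = M.toNat + 1 := by rw [hcol]; simp [col]
    have hgetd : d.getD k [] = buildCol rows := by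
      apply PySem.Dict.getD_of_mem_items _ _ hdnod
      rw [hrel]
      exact List.mem_map.2 ⟨(k, rows), hmemit, rfl⟩
    have hLr : M.toNat + 1 ≤ r := by omega
    -- A's final column value
    have hA : stepA ((r : Int) + 1) d (k, v) =
        d.insert k (col (M.toNat + 1) rows.items ++ List.replicate (r - (M.toNat + 1)) 0 ++ [v]) := by
      show (if d.contains k then _ else _) = _
      rw [hcont, if_pos hc]
      simp only [hgetd, hcol]
      congr 1
      have hlen2 : PySem.List.len (col (M.toNat + 1) rows.items ++ [v]) = ((M.toNat + 1 : Nat) : Int) + 1 := by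
        simp [PySem.List.len_eq, col]
      by_cases hLr' : M.toNat + 1 = r
      · rw [if_neg (by rw [hlen2]; push_cast; omega)]
        rw [hLr']; simp
      · rw [if_pos (by rw [hlen2]; push_cast; omega)]
        unfold padZeros
        rw [hlen2]
        have hre : ((M.toNat + 1 : Nat) : Int) + 1 - 1 = ((col (M.toNat + 1) rows.items).length : Int) := by
          simp [col]
        have hre2 : ((r : Int) + 1 - 1) = ((col (M.toNat + 1) rows.items).length : Int) + ((r - (M.toNat + 1) : Nat) : Int) := by
          simp [col]; omega
        rw [hre, hre2, padA]
    -- B's new rows dict and its column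
    have hrcont : rows.contains (r : Int) = false := by
      rw [PySem.Dict.contains_eq_decide_mem_keys]
      simp only [decide_eq_false_iff_not]
      intro hmem; have := hlt _ hmem; omega
    have hitems' : (rows.insert (r : Int) v).items = rows.items ++ [(((r : Nat) : Int), v)] :=
      PySem.Dict.items_insert_of_not_contains rows v hrcont
    have hkeys' : (rows.insert (r : Int) v).keys = rows.keys ++ [((r : Nat) : Int)] := by
      show (rows.insert (r : Int) v).items.map (fun p => p.1) = _
      rw [hitems', List.map_append]; rfl
    have hmax' : PySem.List.max? (rows.insert (r : Int) v).keys (fun x => x) = some ((r : Nat) : Int) := by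
      rw [hkeys']; exact max?_last _ _ hlt
    have hrnd' : (rows.insert (r : Int) v).keys.Nodup := PySem.Dict.nodup_keys_insert rows _ v hrnd
    have hB : buildCol (rows.insert (r : Int) v) =
        col (M.toNat + 1) rows.items ++ List.replicate (r - (M.toNat + 1)) 0 ++ [v] := by
      rw [buildCol_eq_col (rows.insert (r : Int) v) ((r : Nat) : Int) hrnd'
          (by rw [hkeys']; intro j hj
              rcases List.mem_append.1 hj with h1 | h2
              · exact (hbound j h1).1
              · simp at h2; omega) hmax']
      rw [hitems', Int.toNat_natCast]
      exact col_append rows.items (M.toNat + 1) r v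
        (fun p hp => ⟨(hbound p.1 (List.mem_map_of_mem hp)).1, by
          have := PySem.List.max?_isMax hM p.1 (List.mem_map_of_mem hp); push_cast; omega⟩) hLr
    have hsB : stepB (r : Int) idx (k, v) = idx.insert k (rows.insert (r : Int) v) := by
      show idx.insert k ((idx.getD k PySem.Dict.empty).insert (r : Int) v) = _
      rw [PySem.Dict.getD_of_get?_eq_some _ _ hg]
    refine ⟨?_, ?_, ?_, ?_⟩
    · rw [hA, hsB, PySem.Dict.items_insert_of_contains d _ (hcont.trans hc),
        PySem.Dict.items_insert_of_contains idx _ hc, hrel, List.map_map, List.map_map]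
      apply List.map_congr_left
      intro p hp
      by_cases hpk : p.1 = k
      · simp [Function.comp, hpk, hB]
      · simp [Function.comp, hpk]
    · exact PySem.Dict.nodup_keys_insert idx k _ hnd
    · intro p hp
      rcases (PySem.Dict.mem_items_insert idx _ _ _).1 (by rw [hsB] at hp; exact hp) with hpe | ⟨hpm, _⟩
      · subst hpe
        refine ⟨by rw [hitems']; simp, hrnd', ?_⟩
        rw [hkeys']
        intro j hj
        rcases List.mem_append.1 hj with h1 | h2
        · have := hbound j h1; omega
        · simp at h2; omega
      · obtain ⟨h1, h2, h3⟩ := hrows p hpm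
        exact ⟨h1, h2, h3⟩
    · intro q hq rows' hg'
      have hqk : q.1 ≠ k := by
        intro he; exact hk (he ▸ List.mem_map_of_mem hq)
      rw [hsB, PySem.Dict.get?_insert_of_ne idx _ hqk] at hg'
      intro j hj
      exact hpend q (List.mem_cons_of_mem _ hq) rows' hg' j hj
  case neg =>
    -- first appearance of the key: A creates a zero-padded singleton column, B a fresh row map
    have hc' : idx.contains k = false := by simpa using hc
    have hA : stepA ((r : Int) + 1) d (k, v) =
        d.insert k (List.replicate r 0 ++ [v]) := by
      show (if d.contains k then _ else _) = _
      rw [hcont, if_neg (by simp [hc'])]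
      show d.insert k (if ((r : Int) + 1) ≠ 1 then padZeros [v] 0 ((r : Int) + 1 - 1) else [v]) = _
      congr 1
      by_cases hr0 : r = 0
      · rw [if_neg (by omega)]; subst hr0; simp
      · rw [if_pos (by omega)]
        unfold padZeros
        have h := padA r ([] : List Int) v
        simp only [List.length_nil, Nat.cast_zero, zero_add, List.nil_append] at h
        simpa using h
    have hgetd : idx.getD k PySem.Dict.empty = PySem.Dict.empty :=
      PySem.Dict.getD_of_not_contains idx _ hc'
    have hitems' : ((PySem.Dict.empty : PySem.Dict Int Int).insert (r : Int) v).items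
        = [(((r : Nat) : Int), v)] := by
      rw [PySem.Dict.items_insert_of_not_contains _ v (by simp)]
      rfl
    have hkeys' : ((PySem.Dict.empty : PySem.Dict Int Int).insert (r : Int) v).keys
        = [((r : Nat) : Int)] := by
      show ((PySem.Dict.empty : PySem.Dict Int Int).insert (r : Int) v).items.map (fun p => p.1) = _
      rw [hitems']; rfl
    have hrnd' : ((PySem.Dict.empty : PySem.Dict Int Int).insert (r : Int) v).keys.Nodup := by
      rw [hkeys']; simp
    have hB : buildCol ((PySem.Dict.empty : PySem.Dict Int Int).insert (r : Int) v)
        = List.replicate r 0 ++ [v] := by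
      rw [buildCol_eq_col _ ((r : Nat) : Int) hrnd' (by rw [hkeys']; intro j hj; simp at hj; omega)
          (by rw [hkeys']; exact max?_last [] _ (by simp))]
      rw [hitems', Int.toNat_natCast,
        show ([(((r : Nat) : Int), v)] : List (Int × Int)) = [] ++ [(((r : Nat) : Int), v)] from rfl,
        col_append [] 0 r v (by simp) (by omega)]
      simp [col]
    have hsB : stepB (r : Int) idx (k, v)
        = idx.insert k ((PySem.Dict.empty : PySem.Dict Int Int).insert (r : Int) v) := by
      show idx.insert k ((idx.getD k PySem.Dict.empty).insert (r : Int) v) = _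
      rw [hgetd]
    refine ⟨?_, ?_, ?_, ?_⟩
    · rw [hA, hsB, PySem.Dict.items_insert_of_not_contains d _ (by rw [hcont]; exact hc'),
        PySem.Dict.items_insert_of_not_contains idx _ hc', hrel, List.map_append]
      simp [hB]
    · exact PySem.Dict.nodup_keys_insert idx k _ hnd
    · intro p hp
      rcases (PySem.Dict.mem_items_insert idx _ _ _).1 (by rw [hsB] at hp; exact hp) with hpe | ⟨hpm, _⟩
      · subst hpe
        refine ⟨by rw [hitems']; simp, hrnd', ?_⟩
        rw [hkeys']
        intro j hj
        simp at hj; omega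
      · exact hrows p hpm
    · intro q hq rows' hg'
      have hqk : q.1 ≠ k := by
        intro he; exact hk (he ▸ List.mem_map_of_mem hq)
      rw [hsB, PySem.Dict.get?_insert_of_ne idx _ hqk] at hg'
      exact hpend q (List.mem_cons_of_mem _ hq) rows' hg' 

lemma inner_loop (ps : List (String × Int)) (r : Nat)
    (idx : PySem.Dict String (PySem.Dict Int Int)) (d : PySem.Dict String (List Int))
    (hnd : (ps.map Prod.fst).Nodup) (hInv : InnerInv r ps idx d) :
    InnerInv r [] (ps.foldl (stepB (r : Int)) idx) (ps.foldl (stepA ((r : Int) + 1)) d) := by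
  induction ps generalizing idx d with
  | nil => exact ⟨hInv.1, hInv.2.1, hInv.2.2.1, by simp⟩
  | cons q t ih =>
    obtain ⟨k, v⟩ := q
    simp only [List.map_cons, List.nodup_cons] at hnd
    simp only [List.foldl_cons]
    exact ih _ _ hnd.2 (step_preserve r t k v idx d hnd.1 hInv)

lemma outer_loop (vs : List (List (String × Int))) (r : Nat)
    (idx : PySem.Dict String (PySem.Dict Int Int)) (d : PySem.Dict String (List Int))
    (hInv : LoopInv r idx d) :
    LoopInv (r + vs.length)
      ((PySem.List.enumerate vs (r : Int)).foldl
        (fun index ri => (PySem.Dict.ofList ri.2).items.foldl (stepB ri.1) index) idx)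
      ((vs.foldl
        (fun (st : Int × PySem.Dict String (List Int)) item =>
          (st.1 + 1, (PySem.Dict.ofList item).items.foldl (stepA st.1) st.2))
        (((r : Int) + 1), d)).2) := by
  induction vs generalizing r idx d with
  | nil => simpa using hInv
  | cons item vs ih =>
    rw [PySem.List.enumerate_cons, List.foldl_cons, List.foldl_cons]
    have hknd : ((PySem.Dict.ofList item).items.map Prod.fst).Nodup :=
      PySem.Dict.nodup_keys_ofList item
    have hInner0 : InnerInv r (PySem.Dict.ofList item).items idx d := by
      refine ⟨hInv.1, hInv.2.1, ?_, ?_⟩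
      · intro p hp
        obtain ⟨a, b, c⟩ := hInv.2.2 p hp
        exact ⟨a, b, fun j hj => ⟨(c j hj).1, le_of_lt (c j hj).2⟩⟩
      · intro q hq rows hg j hj
        exact ((hInv.2.2 _ (PySem.Dict.mem_items_of_get?_eq_some idx hg)).2.2 j hj).2
    have h1 := inner_loop (PySem.Dict.ofList item).items r idx d hknd hInner0
    have hLoop : LoopInv (r + 1) ((PySem.Dict.ofList item).items.foldl (stepB (r : Int)) idx)
        ((PySem.Dict.ofList item).items.foldl (stepA ((r : Int) + 1)) d) := by
      refine ⟨h1.1, h1.2.1, ?_⟩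
      intro p hp
      obtain ⟨a, b, c⟩ := h1.2.2.1 p hp
      exact ⟨a, b, fun j hj => ⟨(c j hj).1, by have := (c j hj).2; push_cast; omega⟩⟩
    have h2 := ih (r + 1) _ _ hLoop
    have hlen : r + (item :: vs).length = (r + 1) + vs.length := by simp [List.length_cons]; omega
    rw [hlen]
    dsimp only at h2 ⊢
    push_cast at h2 ⊢
    exact h2

-- ===== VERDICT (by name: the statement is the Claim_ definition above) =====
theorem data_convert_spec : Claim_equal_data_convert := by
  intro data _
  unfold Spec_data_convert data_convert data_convert_alt
  have h0 : LoopInv 0 PySem.Dict.empty PySem.Dict.empty :=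
    ⟨rfl, List.Pairwise.nil, fun p hp => absurd hp List.not_mem_nil⟩
  have h := outer_loop (PySem.Dict.ofList data).values 0 PySem.Dict.empty PySem.Dict.empty h0
  simp only [Nat.cast_zero, zero_add] at h
  dsimp only
  rw [h.1, PySem.Dict.items_foldl_insert_fresh
      ((List.foldl (fun index ri => List.foldl (stepB ri.1) index (PySem.Dict.ofList ri.2).items)
          PySem.Dict.empty (PySem.List.enumerate (PySem.Dict.ofList data).values 0)).items)
      (fun krows => krows.1) (fun krows => buildCol krows.2) PySem.Dict.empty
      (fun a _ => PySem.Dict.contains_empty _) (by exact h.2.1)]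
  simp [show (PySem.Dict.empty : PySem.Dict String (List Int)).items = [] from rfl]
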